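-- pv_equiv track=rewrite | github.com/myelin/pycs | src/comments/export_mt.py | mtesc
-- ===== SOURCE A (Python) =====
-- def mtesc(s):
-- 	# escape something so it'll fit on a "FOO: bar" line
-- 	s = s.strip()
-- 	pos = len(s)
-- 	for x in "\r\n":
-- 		p = s.find(x)
-- 		if p != -1 and pos > p:
-- 			pos = p
-- 	s = s[:pos]
-- 	return s
-- ===== SOURCE B (Python) =====
-- def mtesc(s):
-- 	# single forward pass: copy chars until the first CR or LF
-- 	s = s.strip()
-- 	out = []
-- 	for ch in s:
-- 		if ch in '\r\n':
-- 			break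
-- 		out.append(ch)
-- 	return ''.join(out)
-- ===== Notes on version B (the rewrite author's own statement) =====
-- stated objective: simpler
-- what changed: Replaces A's two separate str.find scans (minimised into a cut position, then a slice) with one forward pass that copies characters until the first CR or LF and then stops.
import Mathlib
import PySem

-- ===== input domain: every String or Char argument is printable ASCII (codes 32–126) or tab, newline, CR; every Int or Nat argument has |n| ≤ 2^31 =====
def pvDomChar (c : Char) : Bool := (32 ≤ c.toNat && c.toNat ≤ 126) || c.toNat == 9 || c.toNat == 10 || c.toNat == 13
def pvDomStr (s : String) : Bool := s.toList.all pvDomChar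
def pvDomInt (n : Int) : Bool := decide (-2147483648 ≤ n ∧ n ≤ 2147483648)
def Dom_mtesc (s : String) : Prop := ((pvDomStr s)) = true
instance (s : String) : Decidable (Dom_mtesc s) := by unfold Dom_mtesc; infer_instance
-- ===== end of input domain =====

-- B replaces A's two str.find scans + slice with one forward pass stopping at the first CR/LF (simpler).

-- ===== PORT A =====
def mtesc (s : String) : String :=
  let s := PySem.Str.strip s
  let pos : Int := PySem.Str.len s
  let pos := ['\r', '\n'].foldl (fun pos x =>
    let p := PySem.Str.find s (String.ofList [x])
    if p ≠ -1 ∧ pos > p then p else pos) pos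
  PySem.Str.slice s none (some pos)

-- ===== PORT B =====
def mtescLoop : List Char → List Char → List Char
  | [], out => out
  | c :: rest, out => if c = '\r' ∨ c = '\n' then out else mtescLoop rest (out ++ [c])

def mtesc_alt (s : String) : String :=
  let s := PySem.Str.strip s
  String.ofList (mtescLoop s.toList [])

-- ===== PRECONDITION & SPEC =====
def Spec_mtesc (s : String) (out : String) : Prop := out = mtesc_alt s
instance (s : String) (out : String) : Decidable (Spec_mtesc s out) := by unfold Spec_mtesc; infer_instance

-- ===== CLAIM (what is proved, stated in full; the proofs are below) =====
def Claim_equal_mtesc : Prop := ∀ (s : String), Dom_mtesc s → Spec_mtesc s (mtesc s)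

-- ===== LEMMAS AND PROOFS =====

theorem mtescLoop_eq_takeWhile (t out : List Char) :
    mtescLoop t out = out ++ t.takeWhile (fun c => !(c == '\r' || c == '\n')) := by
  induction t generalizing out with
  | nil => simp [mtescLoop]
  | cons c rest ih =>
    by_cases h : c = '\r' ∨ c = '\n'
    · simp [mtescLoop, h, List.takeWhile_cons]
      rcases h with h | h <;> simp [h]
    · push_neg at h
      simp [mtescLoop, h.1, h.2, ih, List.takeWhile_cons, h]

theorem take_eq_takeWhile {α : Type} (p : α → Bool) (t : List α) (k : Nat)
    (hk : k ≤ t.length)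
    (hall : ∀ i (h : i < k), p (t[i]'(Nat.lt_of_lt_of_le h hk)) = true)
    (hstop : ∀ h : k < t.length, p (t[k]'h) = false) :
    t.take k = t.takeWhile p := by
  induction t generalizing k with
  | nil => simp
  | cons c rest ih =>
    cases k with
    | zero =>
      have := hstop (by simp)
      simp at this
      simp [List.takeWhile_cons, this]
    | succ k =>
      have hc : p c = true := hall 0 (Nat.succ_pos _)
      simp [List.takeWhile_cons, hc]
      exact ih k (by simpa using hk) (fun i h => hall (i+1) (by omega))
        (fun h => hstop (by simpa using h))

-- [c] is a prefix of t.drop i iff t[i]? = some c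
theorem single_prefix_drop {t : List Char} {c : Char} {i : Nat} :
    [c] <+: t.drop i ↔ t[i]? = some c := by
  constructor
  · rintro ⟨l, hl⟩
    have : (t.drop i)[0]? = some c := by rw [← hl]; simp
    simpa [List.getElem?_drop] using this
  · intro h
    have hi : i < t.length := by
      by_contra hlt
      simp [List.getElem?_eq_none (Nat.le_of_not_lt hlt)] at h
    refine ⟨(t.drop i).tail, ?_⟩
    have : t.drop i = t[i] :: (t.drop i).tail := by
      rw [List.drop_eq_getElem_cons hi]; simp
    rw [this]
    simp [List.getElem?_eq_getElem hi] at h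
    simp [h]

theorem findChar (t : List Char) (c : Char) :
    (PySem.Chars.find t [c] = -1 ∧ ∀ i (h : i < t.length), t[i] ≠ c) ∨
    (∃ n : Nat, PySem.Chars.find t [c] = (n : Int) ∧ n < t.length ∧ t[n]? = some c ∧
      ∀ i, i < n → ∀ (h : i < t.length), t[i] ≠ c) := by
  by_cases h : PySem.Chars.find t [c] = -1
  · left
    refine ⟨h, fun i hi hc => ?_⟩
    rw [PySem.Chars.find_eq_neg_one_iff] at h
    exact h (List.IsInfix.trans (List.IsPrefix.isInfix (single_prefix_drop.mpr
      (by simp [List.getElem?_eq_getElem hi, hc]))) (List.IsSuffix.isInfix (t.drop_suffix i)))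
  · right
    have hnn : 0 ≤ PySem.Chars.find t [c] := by
      have := PySem.Chars.neg_one_le_find t [c]
      omega
    obtain ⟨hpre, hmin⟩ := PySem.Chars.find_spec (s := t) (sub := [c]) hnn
    refine ⟨(PySem.Chars.find t [c]).toNat, by omega, ?_, single_prefix_drop.mp hpre, ?_⟩
    · have := single_prefix_drop.mp hpre
      by_contra hlen
      simp [List.getElem?_eq_none (by omega : t.length ≤ (PySem.Chars.find t [c]).toNat)] at this
    · intro i hi hlt hc
      exact hmin i hi (single_prefix_drop.mpr (by simp [List.getElem?_eq_getElem hlt, hc]))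

theorem slice_toList (u : String) (k : Int) (hk : 0 <= k) :
    (PySem.Str.slice u none (some k)).toList = u.toList.take k.toNat := by
  simp [PySem.Str.toList_slice, PySem.List.slice_to _ hk]

-- ===== VERDICT (by name: the statement is the Claim_ definition above) =====
theorem mtesc_spec : Claim_equal_mtesc := by
  intro s _
  unfold Spec_mtesc mtesc mtesc_alt
  simp only [List.foldl]
  rw [mtescLoop_eq_takeWhile]
  simp only [List.nil_append]
  refine String.toList_inj.mp ?_
  set u := PySem.Str.strip s with hu
  have hfind : forall c : Char, PySem.Str.find u (String.ofList [c]) = PySem.Chars.find u.toList [c] := by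
    intro c; simp
  have hlen : PySem.Str.len u = (u.toList.length : Int) := by
    simp [PySem.Str.len]
  rw [hfind, hfind, hlen]
  have hR := findChar u.toList '\r'
  have hN := findChar u.toList '\n'
  set t := u.toList with ht
  set p : Char -> Bool := fun c => !(c == '\r' || c == '\n') with hp
  rcases hR with (⟨hR1, hR2⟩ | ⟨m, hR1, hm, hRc, hRmin⟩) <;>
    rcases hN with (⟨hN1, hN2⟩ | ⟨n, hN1, hn, hNc, hNmin⟩) <;>
    rw [hR1, hN1] <;> split_ifs with h1 h2 <;> try (exfalso; omega)
  · -- no '\r', no '\n': cut at length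
    rw [slice_toList u _ (by omega)]
    simp only [Int.toNat_natCast, String.toList_ofList]
    symm
    rw [<- take_eq_takeWhile p t t.length le_rfl
      (fun i h => by
        have hx := hR2 i (by omega); have hy := hN2 i (by omega)
        simp [hp, hx, hy])
      (fun h => absurd h (by omega))]
  · -- '\n' only: cut at n
    rw [slice_toList u _ (by omega)]
    simp only [Int.toNat_natCast, String.toList_ofList]
    exact take_eq_takeWhile p t n (le_of_lt hn)
      (fun i h => by
        have hx := hR2 i (by omega); have hy := hNmin i h (by omega)
        simp [hp, hx, hy])
      (fun h => by
        have hc : t[n] = '\n' := by simpa [List.getElem?_eq_getElem h] using hNc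
        simp [hp, hc])
  · -- '\r' only: cut at m
    rw [slice_toList u _ (by omega)]
    simp only [Int.toNat_natCast, String.toList_ofList]
    exact take_eq_takeWhile p t m (le_of_lt hm)
      (fun i h => by
        have hx := hRmin i h (by omega); have hy := hN2 i (by omega)
        simp [hp, hx, hy])
      (fun h => by
        have hc : t[m] = '\r' := by simpa [List.getElem?_eq_getElem h] using hRc
        simp [hp, hc])
  · -- both: '\n' first (n < m)
    rw [slice_toList u _ (by omega)]
    simp only [Int.toNat_natCast, String.toList_ofList]
    exact take_eq_takeWhile p t n (le_of_lt hn)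
      (fun i h => by
        have hx := hRmin i (by omega) (by omega); have hy := hNmin i h (by omega)
        simp [hp, hx, hy])
      (fun h => by
        have hc : t[n] = '\n' := by simpa [List.getElem?_eq_getElem h] using hNc
        simp [hp, hc])
  · -- both: '\r' first (m <= n)
    rw [slice_toList u _ (by omega)]
    simp only [Int.toNat_natCast, String.toList_ofList]
    exact take_eq_takeWhile p t m (le_of_lt hm)
      (fun i h => by
        have hx := hRmin i h (by omega); have hy := hNmin i (by omega) (by omega)
        simp [hp, hx, hy])
      (fun h => by
        have hc : t[m] = '\r' := by simpa [List.getElem?_eq_getElem h] using hRc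
        simp [hp, hc])
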